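-- pv_equiv track=rewrite | github.com/MrBrantCode/unitest_baseline | mut_generate/mist_train_cf/cf_86616/solution.py | product_of_matrix
-- ===== SOURCE A (Python) =====
-- def product_of_matrix(matrix):
--     product = 1
--
--     for row in matrix:
--         for element in row:
--             if element <= 0:
--                 return -1
--             product *= element
--
--     return product
-- ===== SOURCE B (Python) =====
-- import math
--
-- def product_of_matrix(matrix):
--     if any(e <= 0 for row in matrix for e in row):
--         return -1
--     return math.prod(e for row in matrix for e in row)
-- ===== Notes on version B (the rewrite author's own statement) =====
-- stated objective: idiomatic
-- what changed: Splits A's fused guard-and-accumulate loop into a validation pass (any nonpositive -> -1) followed by math.prod over the flattened elements.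
import Mathlib
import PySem

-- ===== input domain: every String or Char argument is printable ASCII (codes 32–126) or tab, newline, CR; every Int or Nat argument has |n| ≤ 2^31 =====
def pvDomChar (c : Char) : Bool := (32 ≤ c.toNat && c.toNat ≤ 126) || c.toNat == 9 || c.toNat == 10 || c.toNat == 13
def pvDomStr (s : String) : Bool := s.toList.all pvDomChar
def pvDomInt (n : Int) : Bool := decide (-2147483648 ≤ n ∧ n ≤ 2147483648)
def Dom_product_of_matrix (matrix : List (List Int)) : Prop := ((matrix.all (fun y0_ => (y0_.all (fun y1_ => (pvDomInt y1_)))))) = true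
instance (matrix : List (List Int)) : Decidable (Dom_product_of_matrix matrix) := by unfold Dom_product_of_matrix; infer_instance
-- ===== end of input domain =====

-- B splits A's fused guard-and-accumulate loop into a validation pass then a library product (objective: idiomatic).


-- ===== PORT A =====
-- A: fused loop, early return -1 on a nonpositive element; Option none = early return
def productRowA (p : Int) : List Int → Option Int
  | [] => some p
  | e :: es => if e ≤ 0 then none else productRowA (p * e) es

def productRowsA (p : Int) : List (List Int) → Int
  | [] => p
  | r :: rs =>
    match productRowA p r with
    | none => -1
    | some p' => productRowsA p' rs

def product_of_matrix (matrix : List (List Int)) : Int :=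
  productRowsA 1 matrix

-- ===== PORT B =====
-- B: validation pass over the flattened elements, then math.prod (= List.prod)
def product_of_matrix_alt (matrix : List (List Int)) : Int :=
  let flat := matrix.flatMap (fun r => r)
  if flat.any (fun e => decide (e ≤ 0)) then -1 else flat.prod

-- ===== PRECONDITION & SPEC =====
def Spec_product_of_matrix (matrix : List (List Int)) (out : Int) : Prop := out = product_of_matrix_alt matrix
instance (matrix : List (List Int)) (out : Int) : Decidable (Spec_product_of_matrix matrix out) := by unfold Spec_product_of_matrix; infer_instance

-- ===== CLAIM (what is proved, stated in full; the proofs are below) =====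
def Claim_equal_product_of_matrix : Prop := ∀ (matrix : List (List Int)), Dom_product_of_matrix matrix → Spec_product_of_matrix matrix (product_of_matrix matrix)

-- ===== LEMMAS AND PROOFS =====

-- ===== VERDICT (by name: the statement is the Claim_ definition above) =====
lemma productRowA_eq (p : Int) (r : List Int) :
    productRowA p r = if r.any (fun e => decide (e ≤ 0)) then none else some (p * r.prod) := by
  induction r generalizing p with
  | nil => simp [productRowA]
  | cons e es ih =>
    simp only [productRowA, List.any_cons, List.prod_cons]
    by_cases h : e ≤ 0
    · simp [h]
    · simp [h, ih, mul_assoc]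

lemma productRowsA_eq (p : Int) (rs : List (List Int)) :
    productRowsA p rs =
      if (rs.flatMap (fun r => r)).any (fun e => decide (e ≤ 0)) then -1
      else p * (rs.flatMap (fun r => r)).prod := by
  induction rs generalizing p with
  | nil => simp [productRowsA]
  | cons r rs ih =>
    simp only [productRowsA, productRowA_eq, List.flatMap_cons, List.any_append,
      List.prod_append]
    by_cases h : r.any (fun e => decide (e ≤ 0))
    · simp [h]
    · simp [h, ih, mul_assoc]

theorem product_of_matrix_spec : Claim_equal_product_of_matrix := by
  intro matrix _
  unfold Spec_product_of_matrix product_of_matrix product_of_matrix_alt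
  simp [productRowsA_eq]
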